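-- pv_equiv track=rewrite | github.com/kamilludwinski/aoc | 2015/19/main.py | distinct_after_one
-- ===== SOURCE A (Python) =====
-- def distinct_after_one(molecule: str, rules: list[tuple[str, str]]) -> int:
--     seen: set[str] = set()
--     for lhs, rhs in rules:
--         start = 0
--
--         while True:
--             i = molecule.find(lhs, start)
--             if i == -1:
--                 break
--
--             seen.add(molecule[:i] + rhs + molecule[i + len(lhs) :])
--             start = i + 1
--
--     return len(seen)
-- ===== SOURCE B (Python) =====
-- def distinct_after_one(molecule: str, rules: list[tuple[str, str]]) -> int:
--     # group the rules by lhs so each distinct lhs is matched against the molecule once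
--     by_lhs: dict[str, list[str]] = {}
--     for lhs, rhs in rules:
--         by_lhs[lhs] = by_lhs.get(lhs, []) + [rhs]
--     # generate every candidate (with duplicates) into a plain list via slice-equality matching
--     cands: list[str] = []
--     n = len(molecule)
--     for lhs, rhss in by_lhs.items():
--         m = len(lhs)
--         for i in range(n + 1):
--             if molecule[i:i + m] == lhs:
--                 head = molecule[:i]
--                 tail = molecule[i + m:]
--                 for rhs in rhss:
--                     cands.append(head + rhs + tail)
--     # count distinct by sort + adjacent scan instead of a hash set
--     cands.sort()
--     count = 0
--     prev = None
--     for c in cands: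
--         if c != prev:
--             count += 1
--         prev = c
--     return count
-- ===== Notes on version B (the rewrite author's own statement) =====
-- stated objective: alternative
-- what changed: Replaces A's per-rule find/start while-loop feeding a hash set by a three-stage pipeline: group the rules by lhs in a dict, generate all candidate strings (with duplicates) into a plain list via slice-equality matching, then sort the list and count distinct strings with an adjacent prev-scan instead of any set.
import Mathlib
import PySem

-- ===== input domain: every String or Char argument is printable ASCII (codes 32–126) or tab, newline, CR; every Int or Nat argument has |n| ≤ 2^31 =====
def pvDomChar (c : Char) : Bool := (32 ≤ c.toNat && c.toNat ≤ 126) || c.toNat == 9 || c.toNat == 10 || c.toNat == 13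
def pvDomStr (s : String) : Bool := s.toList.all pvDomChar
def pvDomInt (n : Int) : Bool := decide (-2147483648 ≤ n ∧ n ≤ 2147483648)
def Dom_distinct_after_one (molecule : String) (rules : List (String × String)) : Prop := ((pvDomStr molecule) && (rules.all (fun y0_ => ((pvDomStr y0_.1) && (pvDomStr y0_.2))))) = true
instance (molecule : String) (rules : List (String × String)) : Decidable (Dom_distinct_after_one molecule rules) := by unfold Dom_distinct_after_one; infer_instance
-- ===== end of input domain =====

-- B replaces A's per-rule find/start while-loop with a hash set by a different pipeline: group the rules by lhs in a dict,
-- generate all candidates (with duplicates) into a plain list by slice-equality matching, then sort and count distinct by an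
-- adjacent prev-scan; equivalence of the returned count is proved ('alternative', not claimed faster).
-- ===== PORT A =====
-- inner 'while True' loop of A: find lhs from 'start', add the replacement, continue from i+1.
-- 'fuel' only bounds the recursion (start strictly increases and find fails past the end), it never changes the result.
def pvFindLoop (mol lhs rhs : List Char) (start : Nat) (seen : PySem.Set (List Char)) (fuel : Nat) : PySem.Set (List Char) :=
  match fuel with
  | 0 => seen
  | Nat.succ fuel =>
    let i := PySem.Chars.findFrom mol lhs (start : Int) none
    if i = -1 then seen
    else pvFindLoop mol lhs rhs (i.toNat + 1)
      (PySem.Set.add seen (mol.take i.toNat ++ rhs ++ mol.drop (i.toNat + lhs.length))) fuel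

def distinct_after_one (molecule : String) (rules : List (String × String)) : Int :=
  let mol := molecule.toList
  ((rules.foldl (fun seen r => pvFindLoop mol r.1.toList r.2.toList 0 seen (mol.length + 2))
      ([] : PySem.Set (List Char))).length : Int)

-- ===== PORT B =====
-- Source B: 'by_lhs[lhs] = by_lhs.get(lhs, []) + [rhs]' is Dict.modify with default []; 'molecule[i:i+m] == lhs' is
-- PySem.List.slice; 'cands.sort()' is PySem.List.sorted with the identity key; the final loop carries (count, prev).
def distinct_after_one_alt (molecule : String) (rules : List (String × String)) : Int :=
  let mol := molecule.toList
  let pairs := rules.map (fun r => (r.1.toList, r.2.toList))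
  let byLhs := pairs.foldl (fun d p => d.modify p.1 [] (· ++ [p.2])) (PySem.Dict.empty : PySem.Dict (List Char) (List (List Char)))
  let cands := byLhs.items.foldl (fun acc p =>
      (PySem.List.pyRange 0 ((mol.length : Int) + 1) 1).foldl (fun acc i =>
        if PySem.List.slice mol (some i) (some (i + (p.1.length : Int))) == p.1 then
          p.2.foldl (fun acc rhs =>
            acc ++ [mol.take i.toNat ++ rhs ++ mol.drop (i.toNat + p.1.length)]) acc
        else acc) acc) ([] : List (List Char))
  let scands := PySem.List.sorted cands (fun x => x) false
  (scands.foldl (fun (st : Int × Option (List Char)) c =>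
      (if some c ≠ st.2 then st.1 + 1 else st.1, some c)) (0, none)).1

-- ===== PRECONDITION & SPEC =====
def Spec_distinct_after_one (molecule : String) (rules : List (String × String)) (out : Int) : Prop := out = distinct_after_one_alt molecule rules
instance (molecule : String) (rules : List (String × String)) (out : Int) : Decidable (Spec_distinct_after_one molecule rules out) := by unfold Spec_distinct_after_one; infer_instance

-- ===== CLAIM (what is proved, stated in full; the proofs are below) =====
def Claim_equal_distinct_after_one : Prop := ∀ (molecule : String) (rules : List (String × String)), Dom_distinct_after_one molecule rules → Spec_distinct_after_one molecule rules (distinct_after_one molecule rules)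

-- ===== LEMMAS AND PROOFS =====

-- the set of strings one replacement can produce: some rule matches at some position i (0 ≤ i ≤ len)
def pvMatch (mol : List Char) (rules : List (String × String)) (x : List Char) : Prop :=
  ∃ r ∈ rules, ∃ i, i ≤ mol.length ∧ r.1.toList <+: mol.drop i ∧
    x = mol.take i ++ r.2.toList ++ mol.drop (i + r.1.toList.length)

-- findFrom past the end is -1 (even for the empty needle)
lemma pv_findFrom_past (s sub : List Char) (k : Nat) (h : s.length < k) :
    PySem.Chars.findFrom s sub (k : Int) none = -1 := by
  simp only [PySem.Chars.findFrom]
  have h0 : ¬ ((k : Int) < 0) := by omega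
  rw [if_neg h0, if_pos (by exact_mod_cast h)]

-- a successful findFrom at a natural start lands at an index ≤ length
lemma pv_findFrom_le (s sub : List Char) (k : Nat) (hk : k ≤ s.length)
    (h : PySem.Chars.findFrom s sub (k : Int) none ≠ -1) :
    (PySem.Chars.findFrom s sub (k : Int) none).toNat ≤ s.length := by
  obtain ⟨hge, hpre, -⟩ := PySem.Chars.findFrom_natCast_spec s sub k hk h
  cases sub with
  | nil =>
    have hfind : ∀ (l : List Char), PySem.Chars.find l [] = 0 := by
      intro l; cases l <;> simp [PySem.Chars.find, PySem.Chars.find.go]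
    simp only [PySem.Chars.findFrom]
    have h0 : ¬ ((k : Int) < 0) := by omega
    rw [if_neg h0, if_neg (by exact_mod_cast Nat.not_lt.mpr hk)]
    simp [hfind]
    omega
  | cons c cs =>
    by_contra hlt
    have hnil : List.drop (PySem.Chars.findFrom s (c :: cs) (k : Int) none).toNat s = [] :=
      List.drop_eq_nil_of_le (by omega)
    rw [hnil] at hpre
    exact List.cons_ne_nil c cs (List.prefix_nil.mp hpre)

-- membership in A's inner while-loop result
lemma pv_mem_findLoop (mol lhs rhs : List Char) :
    ∀ (fuel start : Nat) (seen : PySem.Set (List Char)),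
      mol.length + 1 < start + fuel →
      ∀ x, x ∈ pvFindLoop mol lhs rhs start seen fuel ↔
        x ∈ seen ∨ ∃ i, start ≤ i ∧ i ≤ mol.length ∧ lhs <+: mol.drop i ∧
          x = mol.take i ++ rhs ++ mol.drop (i + lhs.length) := by
  intro fuel
  induction fuel with
  | zero =>
    intro start seen hf x
    simp only [pvFindLoop]
    constructor
    · exact Or.inl
    · rintro (hs | ⟨i, h1, h2, -, -⟩)
      · exact hs
      · omega
  | succ fuel ih =>
    intro start seen hf x
    simp only [pvFindLoop]
    by_cases hi : PySem.Chars.findFrom mol lhs (start : Int) none = -1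
    · rw [if_pos hi]
      constructor
      · exact Or.inl
      · rintro (hs | ⟨i, h1, h2, hp, -⟩)
        · exact hs
        · exfalso
          have hs' : start ≤ mol.length := by omega
          have hninf := (PySem.Chars.findFrom_natCast_eq_neg_one_iff mol lhs start hs').mp hi
          have hdd : mol.drop i = List.drop (i - start) (mol.drop start) := by
            rw [List.drop_drop]; congr 1; omega
          rw [hdd] at hp
          exact hninf (hp.isInfix.trans (List.drop_suffix _ _).isInfix)
    · rw [if_neg hi]
      have hs' : start ≤ mol.length := by
        by_contra hgt
        exact hi (pv_findFrom_past mol lhs start (by omega))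
      obtain ⟨hge, hpre, hmin⟩ := PySem.Chars.findFrom_natCast_spec mol lhs start hs' hi
      have hle := pv_findFrom_le mol lhs start hs' hi
      have hsle : start ≤ (PySem.Chars.findFrom mol lhs (start : Int) none).toNat := by omega
      rw [ih _ _ (by omega) x, PySem.Set.mem_add]
      set j := (PySem.Chars.findFrom mol lhs (start : Int) none).toNat with hj
      constructor
      · rintro ((hs | hx) | ⟨i, h1, h2, hp, hx⟩)
        · exact Or.inl hs
        · exact Or.inr ⟨j, hsle, hle, hpre, hx⟩
        · exact Or.inr ⟨i, by omega, h2, hp, hx⟩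
      · rintro (hs | ⟨i, h1, h2, hp, hx⟩)
        · exact Or.inl (Or.inl hs)
        · rcases lt_trichotomy i j with hlt | rfl | hgt
          · exact absurd hp (hmin i h1 hlt)
          · exact Or.inl (Or.inr hx)
          · exact Or.inr ⟨i, by omega, h2, hp, hx⟩

lemma pv_nodup_findLoop (mol lhs rhs : List Char) :
    ∀ (fuel start : Nat) (seen : PySem.Set (List Char)),
      seen.Nodup → (pvFindLoop mol lhs rhs start seen fuel).Nodup := by
  intro fuel
  induction fuel with
  | zero => intro start seen h; simpa [pvFindLoop] using h
  | succ fuel ih =>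
    intro start seen h
    simp only [pvFindLoop]
    split
    · exact h
    · exact ih _ _ (PySem.Set.nodup_add _ _ h)

-- membership in A's fold over the rules
lemma pv_mem_foldA (mol : List Char) (x : List Char) :
    ∀ (rs : List (String × String)) (seen : PySem.Set (List Char)),
      x ∈ rs.foldl (fun seen r => pvFindLoop mol r.1.toList r.2.toList 0 seen (mol.length + 2)) seen ↔
        x ∈ seen ∨ pvMatch mol rs x := by
  intro rs
  induction rs with
  | nil => intro seen; simp [pvMatch]
  | cons r rs ih =>
    intro seen
    simp only [List.foldl_cons]
    rw [ih, pv_mem_findLoop mol r.1.toList r.2.toList (mol.length + 2) 0 seen (by omega) x]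
    simp only [pvMatch, List.mem_cons]
    constructor
    · rintro ((hs | ⟨i, -, h2, hp, hx⟩) | ⟨r', hr', i, h2, hp, hx⟩)
      · exact Or.inl hs
      · exact Or.inr ⟨r, Or.inl rfl, i, h2, hp, hx⟩
      · exact Or.inr ⟨r', Or.inr hr', i, h2, hp, hx⟩
    · rintro (hs | ⟨r', hr', i, h2, hp, hx⟩)
      · exact Or.inl (Or.inl hs)
      · rcases hr' with rfl | hr'
        · exact Or.inl (Or.inr ⟨i, Nat.zero_le i, h2, hp, hx⟩)
        · exact Or.inr ⟨r', hr', i, h2, hp, hx⟩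

lemma pv_nodup_foldA (mol : List Char) :
    ∀ (rs : List (String × String)) (seen : PySem.Set (List Char)),
      seen.Nodup →
      (rs.foldl (fun seen r => pvFindLoop mol r.1.toList r.2.toList 0 seen (mol.length + 2)) seen).Nodup := by
  intro rs
  induction rs with
  | nil => intro seen h; simpa using h
  | cons r rs ih => intro seen h; exact ih _ (pv_nodup_findLoop _ _ _ _ _ _ h)

-- ---------- B side ----------

-- B's candidate-generating triple fold, flattened to a flatMap
lemma pv_cands_eq_flatMap (mol : List Char) (items : List ((List Char) × List (List Char))) (acc : List (List Char)) :
    items.foldl (fun acc p =>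
      (PySem.List.pyRange 0 ((mol.length : Int) + 1) 1).foldl (fun acc i =>
        if PySem.List.slice mol (some i) (some (i + (p.1.length : Int))) == p.1 then
          p.2.foldl (fun acc rhs =>
            acc ++ [mol.take i.toNat ++ rhs ++ mol.drop (i.toNat + p.1.length)]) acc
        else acc) acc) acc
    = acc ++ items.flatMap (fun p =>
        (PySem.List.pyRange 0 ((mol.length : Int) + 1) 1).flatMap (fun i =>
          if PySem.List.slice mol (some i) (some (i + (p.1.length : Int))) == p.1 then
            p.2.map (fun rhs => mol.take i.toNat ++ rhs ++ mol.drop (i.toNat + p.1.length))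
          else [])) := by
  rw [← PySem.List.foldl_append_eq_flatMap]
  apply PySem.List.foldl_congr_mem
  intro acc p _
  rw [← PySem.List.foldl_append_eq_flatMap]
  apply PySem.List.foldl_congr_mem
  intro acc i _
  split
  · rw [PySem.List.foldl_append_singleton_eq_map]
  · simp

-- membership in B's candidate list (before sorting)
lemma pv_mem_cands (molecule : String) (rules : List (String × String)) (x : List Char) :
    (x ∈ (((rules.map (fun r => (r.1.toList, r.2.toList))).foldl
        (fun (d : PySem.Dict (List Char) (List (List Char))) p => d.modify p.1 [] (· ++ [p.2]))
        PySem.Dict.empty).items).foldl (fun acc p =>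
      (PySem.List.pyRange 0 ((molecule.toList.length : Int) + 1) 1).foldl (fun acc i =>
        if PySem.List.slice molecule.toList (some i) (some (i + (p.1.length : Int))) == p.1 then
          p.2.foldl (fun acc rhs =>
            acc ++ [molecule.toList.take i.toNat ++ rhs ++ molecule.toList.drop (i.toNat + p.1.length)]) acc
        else acc) acc) ([] : List (List Char)))
    ↔ pvMatch molecule.toList rules x := by
  set mol := molecule.toList with hmol
  set pairs := rules.map (fun r => (r.1.toList, r.2.toList)) with hpairs
  set byLhs := pairs.foldl (fun d p => d.modify p.1 [] (· ++ [p.2]))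
    (PySem.Dict.empty : PySem.Dict (List Char) (List (List Char))) with hby
  have hnd : byLhs.keys.Nodup := by
    rw [hby]
    exact PySem.Dict.nodup_keys_foldl_modify_key pairs Prod.fst [] (fun d p => (· ++ [p.2])) _
      (by simp [PySem.Dict.keys_empty])
  have hget : ∀ L, byLhs.getD L [] = (pairs.filter (fun p => p.1 == L)).map (·.2) := by
    intro L
    rw [hby, PySem.Dict.getD_foldl_modify_append]
    simp [PySem.Dict.getD_empty]
  have hkeys : ∀ L, L ∈ byLhs.keys ↔ L ∈ pairs.map (·.1) := by
    intro L
    rw [hby, PySem.Dict.keys_foldl_modify_key]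
    simp [PySem.Set.mem_update, PySem.Dict.keys_empty]
  have hitems : byLhs.items = byLhs.keys.map (fun k => (k, byLhs.getD k [])) :=
    PySem.Dict.items_eq_map_keys byLhs hnd []
  rw [pv_cands_eq_flatMap]
  simp only [List.nil_append, List.mem_flatMap, hitems, List.mem_map]
  constructor
  · rintro ⟨p, ⟨L, hL, rfl⟩, i, hi, hx⟩
    simp only [PySem.List.mem_pyRange_one] at hi
    have hieq : i = (i.toNat : Int) := by omega
    have hilen : i.toNat ≤ mol.length := by omega
    rw [hieq, PySem.List.slice_natCast_add] at hx
    by_cases hc : (mol.drop i.toNat).take L.length == L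
    · rw [if_pos hc] at hx
      simp only [List.mem_map] at hx
      obtain ⟨rhs, hrhs, rfl⟩ := hx
      rw [hget] at hrhs
      simp only [List.mem_map, List.mem_filter] at hrhs
      obtain ⟨q, ⟨hq, hq1⟩, rfl⟩ := hrhs
      rw [hpairs] at hq
      simp only [List.mem_map] at hq
      obtain ⟨r, hr, rfl⟩ := hq
      have hq1' : r.1.toList = L := by simpa using hq1
      refine ⟨r, hr, i.toNat, hilen, ?_, ?_⟩
      · rw [hq1', List.prefix_iff_eq_take]
        exact (eq_of_beq hc).symm
      · simp [hq1', max_eq_left hi.1]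
    · rw [if_neg hc] at hx
      simp at hx
  · rintro ⟨r, hr, i, hi, hp, rfl⟩
    have hq : (r.1.toList, r.2.toList) ∈ pairs := by
      rw [hpairs]; exact List.mem_map.mpr ⟨r, hr, rfl⟩
    have hLk : r.1.toList ∈ byLhs.keys := by
      rw [hkeys]
      exact List.mem_map.mpr ⟨_, hq, rfl⟩
    refine ⟨(r.1.toList, byLhs.getD r.1.toList []), ⟨r.1.toList, hLk, rfl⟩, (i : Int), ?_, ?_⟩
    · simp only [PySem.List.mem_pyRange_one]; omega
    · have hsl : PySem.List.slice mol (some (i : Int)) (some ((i : Int) + (r.1.toList.length : Int)))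
          = (mol.drop i).take r.1.toList.length := PySem.List.slice_natCast_add mol i r.1.toList.length
      have hc : ((mol.drop i).take r.1.toList.length == r.1.toList) = true := by
        simp only [beq_iff_eq]
        exact (List.prefix_iff_eq_take.mp hp).symm
      rw [hsl, if_pos hc]
      simp only [List.mem_map, Int.toNat_natCast]
      refine ⟨r.2.toList, ?_, rfl⟩
      rw [hget]
      simp only [List.mem_map, List.mem_filter]
      exact ⟨(r.1.toList, r.2.toList), ⟨hq, by simp⟩, rfl⟩

-- the prev-scan counts the runs: its result is the length of destutter (· ≠ ·)
lemma pv_count_fold' (l : List (List Char)) :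
    ∀ (a : List Char) (c : Int),
      (l.foldl (fun (st : Int × Option (List Char)) x =>
        (if some x ≠ st.2 then st.1 + 1 else st.1, some x)) (c, some a)).1
      = c + ((List.destutter' (· ≠ ·) a l).length : Int) - 1 := by
  induction l with
  | nil => intro a c; simp [List.destutter']
  | cons b t ih =>
    intro a c
    simp only [List.foldl_cons, List.destutter']
    by_cases hb : b = a
    · subst hb
      rw [if_neg (by simp), if_neg (by simp)]
      exact ih b c
    · rw [if_pos (by simp [hb]), if_pos (Ne.symm hb)]
      rw [ih b (c + 1)]
      simp only [List.length_cons]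
      push_cast
      ring

lemma pv_count_fold (l : List (List Char)) :
    (l.foldl (fun (st : Int × Option (List Char)) x =>
      (if some x ≠ st.2 then st.1 + 1 else st.1, some x)) (0, none)).1
    = ((l.destutter (· ≠ ·)).length : Int) := by
  cases l with
  | nil => simp [List.destutter]
  | cons a t =>
    simp only [List.foldl_cons, List.destutter_cons']
    rw [if_pos (by simp)]
    rw [pv_count_fold' t a (0 + 1)]
    have := List.mem_destutter' (R := (· ≠ · : List Char → List Char → Prop)) (l := t) a
    have hlen : 1 ≤ (List.destutter' (· ≠ ·) a t).length := List.length_pos_of_mem this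
    omega

-- destutter with (· ≠ ·) keeps every member
lemma pv_mem_destutter' (t : List (List Char)) :
    ∀ (a x : List Char), x ∈ a :: t → x ∈ List.destutter' (· ≠ ·) a t := by
  induction t with
  | nil => intro a x hx; simpa [List.destutter'] using hx
  | cons b t ih =>
    intro a x hx
    simp only [List.destutter']
    by_cases hab : a = b
    · rw [if_neg (by simp [hab])]
      rcases List.mem_cons.mp hx with hxa | hx
      · exact ih a x (by rw [hxa]; exact List.mem_cons_self)
      · rcases List.mem_cons.mp hx with hxb | hx
        · exact ih a x (by rw [hxb, ← hab]; exact List.mem_cons_self)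
        · exact ih a x (List.mem_cons_of_mem _ hx)
    · rw [if_pos (by simp [hab])]
      rcases List.mem_cons.mp hx with hxa | hx
      · rw [hxa]; exact List.mem_cons_self
      · exact List.mem_cons_of_mem _ (ih b x hx)

-- destutter with (· ≠ ·) has the same members as the list
lemma pv_mem_destutter (l : List (List Char)) (x : List Char) :
    x ∈ l.destutter (· ≠ ·) ↔ x ∈ l := by
  cases l with
  | nil => simp [List.destutter]
  | cons a t =>
    rw [List.destutter_cons']
    constructor
    · intro hx
      exact (List.destutter'_sublist (R := (· ≠ · : List Char → List Char → Prop)) (l := t) a).mem hx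
    · exact pv_mem_destutter' t a x

-- a ≤-sorted ≠-chain is strictly increasing, hence Nodup
lemma pv_pairwise_lt (l : List (List Char)) (hle : l.Pairwise (· ≤ ·))
    (hch : l.IsChain (· ≠ ·)) : l.Pairwise (· < ·) := by
  induction l with
  | nil => exact List.Pairwise.nil
  | cons a t ih =>
    rcases List.pairwise_cons.mp hle with ⟨ha, hle'⟩
    cases t with
    | nil => simp
    | cons b t' =>
      have hab : a ≠ b := (List.isChain_cons_cons.mp hch).1
      have hch' : (b :: t').IsChain (· ≠ ·) := (List.isChain_cons_cons.mp hch).2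
      have hpt := ih hle' hch'
      refine List.pairwise_cons.mpr ⟨?_, hpt⟩
      intro x hx
      have haltb : a < b := lt_of_le_of_ne (ha b List.mem_cons_self) hab
      rcases List.mem_cons.mp hx with rfl | hx
      · exact haltb
      · exact lt_trans haltb ((List.pairwise_cons.mp hpt).1 x hx)

lemma pv_isChain_destutter (l : List (List Char)) : (l.destutter (· ≠ ·)).IsChain (· ≠ ·) := by
  cases l with
  | nil => simp [List.destutter]
  | cons a t =>
    rw [List.destutter_cons']
    exact List.isChain_destutter' _ t a

-- pairwise ≤ of B's sort, with the elaborated (defeq) instances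
lemma pv_sorted_pairwise (l : List (List Char)) :
    (PySem.List.sorted l (fun x => x) false).Pairwise (· ≤ ·) := by
  have := PySem.List.sorted_pairwise (κ := List Char) l (fun x => x)
  convert this using 2

-- ===== VERDICT (by name: the statement is the Claim_ definition above) =====
theorem distinct_after_one_spec : Claim_equal_distinct_after_one := by
  intro molecule rules _
  unfold Spec_distinct_after_one distinct_after_one distinct_after_one_alt
  set mol := molecule.toList with hmol
  set seenA := rules.foldl (fun seen r => pvFindLoop mol r.1.toList r.2.toList 0 seen (mol.length + 2))
    ([] : PySem.Set (List Char)) with hseen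
  set cands := ((rules.map (fun r => (r.1.toList, r.2.toList))).foldl
      (fun d p => d.modify p.1 [] (· ++ [p.2]))
      (PySem.Dict.empty : PySem.Dict (List Char) (List (List Char)))).items.foldl (fun acc p =>
    (PySem.List.pyRange 0 ((mol.length : Int) + 1) 1).foldl (fun acc i =>
      if PySem.List.slice mol (some i) (some (i + (p.1.length : Int))) == p.1 then
        p.2.foldl (fun acc rhs =>
          acc ++ [mol.take i.toNat ++ rhs ++ mol.drop (i.toNat + p.1.length)]) acc
      else acc) acc) ([] : List (List Char)) with hcands
  set scands := PySem.List.sorted cands (fun x => x) false with hscands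
  rw [pv_count_fold scands]
  set d := scands.destutter (· ≠ ·) with hd
  have hmemd : ∀ x, x ∈ d ↔ pvMatch mol rules x := by
    intro x
    rw [hd, pv_mem_destutter scands x]
    have h2 : x ∈ scands ↔ x ∈ cands := PySem.List.mem_sorted cands (fun x => x) false x
    rw [h2, hcands, hmol]
    exact pv_mem_cands molecule rules x
  have hndd : d.Nodup := by
    have hle : scands.Pairwise (· ≤ ·) := pv_sorted_pairwise cands
    have hch : d.IsChain (· ≠ ·) := pv_isChain_destutter scands
    have hled : d.Pairwise (· ≤ ·) := List.Pairwise.sublist (List.destutter_sublist _ _) hle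
    exact (pv_pairwise_lt d hled hch).imp ne_of_lt
  have hmemA : ∀ x, x ∈ seenA ↔ pvMatch mol rules x := by
    intro x
    rw [hseen, pv_mem_foldA mol x rules []]
    simp
  have hndA : seenA.Nodup := pv_nodup_foldA mol rules _ List.nodup_nil
  have hperm : seenA.Perm d := by
    rw [List.perm_ext_iff_of_nodup hndA hndd]
    intro x
    rw [hmemA x, hmemd x]
  exact congrArg Int.ofNat hperm.length_eq
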